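-- pv_equiv track=rewrite | github.com/LenchikTs/pythonProject | codi.py | solution
-- ===== SOURCE A (Python) =====
-- def solution(A):
--     x=0
--     B=[]
--     C=[]
--     D=[]
--     D1=[]
--     for i in range(len(A)):
--         if i%2==0:
--             B.append(0)
--             C.append(1)
--         else:
--             B.append(1)
--             C.append(0)
--     for i in range(len(A)):
--         if A[i]!=B[i]:
--             D.append(A.index(A[i],i,len(A)))
--         if A[i]!=C[i]:
--             D1.append(A.index(A[i], i, len(A)))
--     if len(D)<=len(D1):
--         x=len(D)
--         for i in range(len(D)):
--             A[D[i]]=B[D[i]]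
--     elif len(D)>len(D1):
--         x = len(D1)
--         for i in range(len(D1)):
--             A[D1[i]] = C[D1[i]]
--     return x
-- ===== SOURCE B (Python) =====
-- def solution(A):
--     ev = A[::2]
--     od = A[1::2]
--     keep = max(ev.count(0) + od.count(1), ev.count(1) + od.count(0))
--     return len(A) - keep
-- ===== Notes on version B (the rewrite author's own statement) =====
-- stated objective: faster
-- what changed: B splits A by index parity with step slices and counts OCCURRENCES of 0 and 1 in each half (list.count), returning len(A) minus the larger number of already-correct positions; no per-position pattern comparison, no pattern lists, no index scans.
import Mathlib
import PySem

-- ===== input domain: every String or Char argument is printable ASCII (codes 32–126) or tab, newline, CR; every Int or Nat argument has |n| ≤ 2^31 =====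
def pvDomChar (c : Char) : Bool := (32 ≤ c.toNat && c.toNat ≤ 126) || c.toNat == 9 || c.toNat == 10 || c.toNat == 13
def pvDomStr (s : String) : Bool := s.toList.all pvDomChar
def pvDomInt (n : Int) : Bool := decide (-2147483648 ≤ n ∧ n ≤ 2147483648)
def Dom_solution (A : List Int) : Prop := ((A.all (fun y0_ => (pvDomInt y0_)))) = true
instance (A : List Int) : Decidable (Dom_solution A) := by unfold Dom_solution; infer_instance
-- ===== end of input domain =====

-- B replaces A's quadratic pattern-list/index machinery by a parity split (step slices) and
-- occurrence counts of 0/1 in each half, returning len(A) minus the kept positions (objective: faster).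
-- A mutates its argument list in place at the end; the equivalence proved here is about the RETURN value only.

-- ===== PORT A =====
-- A.index(x, i, n): first absolute index of x in A[i:n]; Python raises ValueError when absent,
-- which never happens in A (x = A[i] is the head of the slice), so the none branch is unreachable.
def pyIndexFrom (A : List Int) (x : Int) (i n : Int) : Int :=
  match PySem.List.index? (PySem.List.slice A (some i) (some n)) x with
  | some k => i + (k : Int)
  | none => 0

-- n, (B, C), (D, D1): A's local variables, one helper each (lets break up badly in proofs)
def pvN (A : List Int) : Int := PySem.List.len A

def pvBC (A : List Int) : List Int × List Int :=
  (PySem.List.pyRange 0 (pvN A) 1).foldl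
    (fun (bc : List Int × List Int) i =>
      if PySem.Int.mod i 2 = 0 then (bc.1 ++ [(0:Int)], bc.2 ++ [(1:Int)])
      else (bc.1 ++ [(1:Int)], bc.2 ++ [(0:Int)]))
    ([], [])

def pvDD (A : List Int) : List Int × List Int :=
  (PySem.List.pyRange 0 (pvN A) 1).foldl
    (fun (dd : List Int × List Int) i =>
      (if PySem.List.pyGetD A i 0 ≠ PySem.List.pyGetD (pvBC A).1 i 0
         then dd.1 ++ [pyIndexFrom A (PySem.List.pyGetD A i 0) i (pvN A)] else dd.1,
       if PySem.List.pyGetD A i 0 ≠ PySem.List.pyGetD (pvBC A).2 i 0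
         then dd.2 ++ [pyIndexFrom A (PySem.List.pyGetD A i 0) i (pvN A)] else dd.2))
    ([], [])

def solution (A : List Int) : Int :=
  if (pvDD A).1.length ≤ (pvDD A).2.length then ((pvDD A).1.length : Int)
  else ((pvDD A).2.length : Int)

-- ===== PORT B =====
-- A[::2] and A[1::2]: step slices via PySem.List.slice?; the step is the literal 2 ≠ 0,
-- so slice? never returns none and the getD [] branch is unreachable.
def solution_alt (A : List Int) : Int :=
  let ev := (PySem.List.slice? A none none 2).getD []
  let od := (PySem.List.slice? A (some 1) none 2).getD []
  PySem.List.len A -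
    max ((PySem.List.count ev 0 : Int) + (PySem.List.count od 1 : Int))
        ((PySem.List.count ev 1 : Int) + (PySem.List.count od 0 : Int))

-- ===== PRECONDITION & SPEC =====
def Spec_solution (A : List Int) (out : Int) : Prop := out = solution_alt A
instance (A : List Int) (out : Int) : Decidable (Spec_solution A out) := by unfold Spec_solution; infer_instance

-- ===== CLAIM =====
def Claim_equal_solution : Prop := ∀ (A : List Int), Dom_solution A → Spec_solution A (solution A)

-- ===== LEMMAS AND PROOFS =====

/-- Mismatch count of `A` against the alternating pattern `e, 1-e, e, …`. -/
def cnt : List Int → Int → Nat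
  | [], _ => 0
  | a :: t, e => (if a = e then 0 else 1) + cnt t (1 - e)

/-- Elements at even positions (what `A[::2]` selects). -/
def evens : List Int → List Int
  | [] => []
  | [a] => [a]
  | a :: _ :: t => a :: evens t

/-- Elements at odd positions (what `A[1::2]` selects). -/
def odds : List Int → List Int
  | [] => []
  | [_] => []
  | _ :: b :: t => b :: odds t

theorem fm_two : ∀ (A : List Int),
    List.filterMap (fun k => A[2*k]?) (List.range ((A.length+1)/2)) = evens A := by
  intro A
  induction A using evens.induct with
  | case1 => simp [evens]
  | case2 a => simp [evens]
  | case3 a b t ih =>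
    have hlen : ((a :: b :: t).length + 1) / 2 = (t.length + 1) / 2 + 1 := by
      simp; omega
    rw [hlen, List.range_succ_eq_map, List.filterMap_cons, List.filterMap_map]
    have : ((fun k => (a :: b :: t)[2*k]?) ∘ Nat.succ) = (fun k => t[2*k]?) := by
      funext k
      simp [Function.comp, show 2 * (k+1) = 2*k+2 by omega]
    rw [this, ih]
    simp [evens]

theorem fm_two_odd : ∀ (A : List Int),
    List.filterMap (fun k => A[2*k+1]?) (List.range (A.length/2)) = odds A := by
  intro A
  induction A using odds.induct with
  | case1 => simp [odds]
  | case2 a => simp [odds]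
  | case3 a b t ih =>
    have hlen : (a :: b :: t).length / 2 = t.length / 2 + 1 := by
      simp; omega
    rw [hlen, List.range_succ_eq_map, List.filterMap_cons, List.filterMap_map]
    have : ((fun k => (a :: b :: t)[2*k+1]?) ∘ Nat.succ) = (fun k => t[2*k+1]?) := by
      funext k
      simp [Function.comp, show 2 * (k+1) + 1 = (2*k+1)+2 by omega]
    rw [this, ih]
    simp [odds]

theorem slice?_step_two (A : List Int) :
    PySem.List.slice? A none none 2 = some (evens A) := by
  unfold PySem.List.slice? PySem.List.sliceIndices
  norm_num
  have hf : (fun (x : Nat) => A[(2 * (x:Int)).toNat]?) = (fun k => A[2*k]?) := by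
    funext k; congr 1
  have hr : (if 0 < A.length then (((A.length:Int) + 2 - 1) / 2).toNat else 0) = (A.length + 1)/2 := by
    split_ifs with h <;> omega
  rw [hf, hr, fm_two A]

theorem slice?_one_step_two (A : List Int) :
    PySem.List.slice? A (some 1) none 2 = some (odds A) := by
  cases A with
  | nil => decide
  | cons a t =>
    unfold PySem.List.slice? PySem.List.sliceIndices
    norm_num
    have hf : (fun (x : Nat) => (a :: t)[(1 + 2 * (x:Int)).toNat]?) = (fun k => (a :: t)[2*k+1]?) := by
      funext k; congr 1; omega
    have hr : (if 0 < t.length then (((t.length:Int) + 2 - 1) / 2).toNat else 0)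
        = (a :: t).length / 2 := by
      split_ifs with h <;> simp <;> omega
    rw [hf, hr, fm_two_odd]

/-- The alternating mismatch count in terms of occurrence counts in the parity halves. -/
theorem cnt_split : ∀ (A : List Int) (e : Int),
    (cnt A e : Int) =
      (A.length : Int) - (((evens A).count e : Int) + ((odds A).count (1 - e) : Int)) := by
  intro A
  induction A using evens.induct with
  | case1 => intro e; simp [cnt, evens, odds]
  | case2 a =>
    intro e
    simp only [cnt, evens, odds, List.count_cons, List.count_nil, List.length_cons,
      List.length_nil]
    by_cases h : a = e <;> simp [h]
  | case3 a b t ih =>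
    intro e
    have h2 : (1:Int) - (1 - e) = e := by ring
    simp only [cnt, h2, evens, odds, List.count_cons, List.length_cons]
    have := ih e
    by_cases ha : a = e <;> by_cases hb : b = 1 - e <;>
      simp [ha, hb] <;> omega

/-- The first loop of A builds exactly the two alternating 0/1 pattern lists. -/
theorem bc_fold_eq (n : Nat) :
    ((PySem.List.pyRange 0 (n : Int) 1).foldl
      (fun (bc : List Int × List Int) i =>
        if PySem.Int.mod i 2 = 0 then (bc.1 ++ [(0:Int)], bc.2 ++ [(1:Int)])
        else (bc.1 ++ [(1:Int)], bc.2 ++ [(0:Int)]))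
      ([], []))
    = ((List.range n).map (fun k => if k % 2 = 0 then (0:Int) else 1),
       (List.range n).map (fun k => if k % 2 = 0 then (1:Int) else 0)) := by
  induction n with
  | zero => simp
  | succ m ih =>
    have hcast : ((m + 1 : Nat) : Int) = (m : Int) + 1 := by push_cast; ring
    rw [hcast, PySem.List.pyRange_one_succ_right (by positivity), List.foldl_append, ih]
    simp only [List.foldl_cons, List.foldl_nil, List.range_succ, List.map_append, List.map_cons,
      List.map_nil]
    have hmod : PySem.Int.mod (m : Int) 2 = ((m % 2 : Nat) : Int) := by
      exact_mod_cast PySem.Int.mod_natCast m 2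
    by_cases h : m % 2 = 0 <;> (simp [hmod, h]; try omega)

/-- Generic: the lengths of the two appended lists of A's second loop count the true conditions. -/
theorem pair_fold_len {ι : Type} (p q : ι → Prop) [DecidablePred p] [DecidablePred q]
    (u v : ι → Int) :
    ∀ (l : List ι) (d d1 : List Int),
    (l.foldl (fun (dd : List Int × List Int) i =>
        (if p i then dd.1 ++ [u i] else dd.1, if q i then dd.2 ++ [v i] else dd.2)) (d, d1))
    = (d ++ (l.filter (fun i => decide (p i))).map u, d1 ++ (l.filter (fun i => decide (q i))).map v) := by
  intro l
  induction l with
  | nil => simp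
  | cons a t ih =>
    intro d d1
    simp only [List.foldl_cons]
    by_cases hp : p a <;> by_cases hq : q a <;>
      simp [hp, hq, ih]

/-- Index-based mismatch counting against the alternating pattern equals the structural count. -/
theorem countP_range_eq_cnt : ∀ (A : List Int) (e : Int),
    ((List.range A.length).countP
      (fun k => decide (A.getD k 0 ≠ (if k % 2 = 0 then e else 1 - e)))) = cnt A e := by
  intro A
  induction A with
  | nil => intro e; simp [cnt]
  | cons a t ih =>
    intro e
    rw [List.length_cons, List.range_succ_eq_map, List.countP_cons, List.countP_map]
    have h1 : (List.range t.length).countP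
        ((fun k => decide ((a :: t).getD k 0 ≠ (if k % 2 = 0 then e else 1 - e))) ∘ Nat.succ)
        = (List.range t.length).countP
          (fun k => decide (t.getD k 0 ≠ (if k % 2 = 0 then (1 - e) else 1 - (1 - e)))) := by
      apply List.countP_congr
      intro k _
      have hmod : (k + 1) % 2 = 0 ↔ ¬ (k % 2 = 0) := by omega
      by_cases h : k % 2 = 0 <;>
        simp [Function.comp, Nat.succ_eq_add_one, h, hmod,
          show (1 : Int) - (1 - e) = e by ring]
    rw [h1, ih]
    simp only [cnt, List.getD_cons_zero]
    by_cases h : a = e <;> (simp [h]; try omega)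

theorem cond_congr (A Bl : List Int) (e : Int)
    (hB : Bl = (List.range A.length).map (fun k => if k % 2 = 0 then e else 1 - e)) :
    ((PySem.List.pyRange 0 (A.length : Int) 1).countP
      (fun i => decide (PySem.List.pyGetD A i 0 ≠ PySem.List.pyGetD Bl i 0)))
    = cnt A e := by
  rw [← countP_range_eq_cnt A e]
  rw [PySem.List.pyRange_one]
  simp only [sub_zero, Int.toNat_natCast, List.countP_map]
  apply List.countP_congr
  intro k hk
  have hk' : k < A.length := List.mem_range.mp hk
  have hA : PySem.List.pyGetD A (0 + (k : Int)) 0 = A.getD k 0 := by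
    rw [zero_add]; exact PySem.List.pyGetD_natCast A k 0
  have hBl : PySem.List.pyGetD Bl (0 + (k : Int)) 0 = (if k % 2 = 0 then e else 1 - e) := by
    rw [zero_add, PySem.List.pyGetD_natCast, hB]
    simp [List.getD, hk']
  simp only [Function.comp]
  rw [hA, hBl]

theorem solution_eq (A : List Int) :
    solution A = if cnt A 0 ≤ cnt A 1 then ((cnt A 0 : Nat) : Int) else ((cnt A 1 : Nat) : Int) := by
  unfold solution
  have hn : pvN A = (A.length : Int) := PySem.List.len_eq A
  have hbc : pvBC A = ((List.range A.length).map (fun k => if k % 2 = 0 then (0:Int) else 1),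
       (List.range A.length).map (fun k => if k % 2 = 0 then (1:Int) else 0)) := by
    rw [pvBC, hn]; exact bc_fold_eq A.length
  rw [pvDD, hn, hbc]
  rw [pair_fold_len
    (p := fun i => PySem.List.pyGetD A i 0 ≠ PySem.List.pyGetD ((List.range A.length).map (fun k => if k % 2 = 0 then (0:Int) else 1)) i 0)
    (q := fun i => PySem.List.pyGetD A i 0 ≠ PySem.List.pyGetD ((List.range A.length).map (fun k => if k % 2 = 0 then (1:Int) else 0)) i 0)
    (u := fun i => pyIndexFrom A (PySem.List.pyGetD A i 0) i (A.length : Int))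
    (v := fun i => pyIndexFrom A (PySem.List.pyGetD A i 0) i (A.length : Int))]
  simp only [List.nil_append, List.length_map, ← List.countP_eq_length_filter]
  rw [cond_congr A _ 0 (by norm_num), cond_congr A _ 1 (by norm_num)]

theorem solution_alt_eq (A : List Int) :
    solution_alt A = min ((cnt A 0 : Int)) ((cnt A 1 : Int)) := by
  unfold solution_alt
  rw [slice?_step_two, slice?_one_step_two]
  simp only [Option.getD_some, PySem.List.len_eq, PySem.List.count_eq]
  have h0 := cnt_split A 0
  have h1 := cnt_split A 1
  have hle0 : ((evens A).count (0:Int) : Int) + ((odds A).count (1:Int) : Int) ≤ (A.length : Int) := by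
    simp only [show (1:Int) - 0 = 1 by ring] at h0
    have : (0 : Int) ≤ (cnt A 0 : Int) := Int.natCast_nonneg _
    omega
  have hle1 : ((evens A).count (1:Int) : Int) + ((odds A).count (0:Int) : Int) ≤ (A.length : Int) := by
    simp only [show (1:Int) - 1 = 0 by ring] at h1
    have : (0 : Int) ≤ (cnt A 1 : Int) := Int.natCast_nonneg _
    omega
  simp only [show (1:Int) - 0 = 1 by ring] at h0
  simp only [show (1:Int) - 1 = 0 by ring] at h1
  simp only [List.count_eq_countP] at *
  omega

-- ===== VERDICT =====
theorem solution_spec : Claim_equal_solution := by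
  intro A _
  unfold Spec_solution
  rw [solution_eq, solution_alt_eq]
  rw [min_def]
  by_cases h : cnt A 0 ≤ cnt A 1
  · simp [h, Int.ofNat_le.mpr h]
  · have : ¬ ((cnt A 0 : Int) ≤ (cnt A 1 : Int)) := by exact_mod_cast h
    simp [h, this]
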